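-- pv_equiv track=rewrite | github.com/ptarau/PythonProvers | base.py | to_bins
-- ===== SOURCE A (Python) =====
-- def to_bins(ns):
--     bs = []
--     m = max(ns)
--     for i in range(m + 1):
--         if i in ns:
--             d = 1
--         else:
--             d = 0
--         bs.append(d)
--     return bs
-- ===== SOURCE B (Python) =====
-- def to_bins(ns):
--     m = max(ns)
--     bs = [0] * (m + 1)
--     for n in ns:
--         if n >= 0:
--             bs[n] = 1
--     return bs
-- ===== Notes on version B (the rewrite author's own statement) =====
-- stated objective: faster
-- what changed: Replaces A's scan over every index 0..max with an 'i in ns' membership test per index by a pre-zeroed table and one scatter pass over the elements, setting bs[n]=1 for each non-negative n.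
import Mathlib
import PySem

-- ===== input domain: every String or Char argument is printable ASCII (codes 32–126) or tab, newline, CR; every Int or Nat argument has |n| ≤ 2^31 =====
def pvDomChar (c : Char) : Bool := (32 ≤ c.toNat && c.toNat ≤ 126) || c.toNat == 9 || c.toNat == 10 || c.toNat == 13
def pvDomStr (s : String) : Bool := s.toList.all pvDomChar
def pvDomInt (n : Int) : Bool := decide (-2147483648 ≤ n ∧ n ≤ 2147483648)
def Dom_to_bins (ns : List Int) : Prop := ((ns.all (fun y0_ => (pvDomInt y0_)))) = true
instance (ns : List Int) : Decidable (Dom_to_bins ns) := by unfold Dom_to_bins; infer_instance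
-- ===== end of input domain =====

-- B replaces A's per-index membership scan (O(m·n)) by a pre-zeroed table and one scatter pass over the elements (faster in a timing run).


-- ===== PORT A =====
def to_bins (ns : List Int) : List Int :=
  match PySem.List.max? ns (fun x => x) with
  | none => []   -- unreachable under Pre_ (Python's max raises ValueError on [])
  | some m =>
      (PySem.List.pyRange 0 (m + 1) 1).foldl
        (fun bs i => bs ++ [if i ∈ ns then (1 : Int) else 0]) []

-- ===== PORT B =====
def to_bins_alt (ns : List Int) : List Int :=
  match PySem.List.max? ns (fun x => x) with
  | none => []   -- unreachable under Pre_ (max raises on [])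
  | some m =>
      ns.foldl (fun bs n => if 0 ≤ n then bs.set n.toNat 1 else bs)
        (List.replicate (m + 1).toNat 0)

-- ===== PRECONDITION & SPEC =====
-- Pre_ excludes only the empty list, on which Python's max (in both A and B) raises ValueError.
def Pre_to_bins (ns : List Int) : Prop := ns ≠ []
instance (ns : List Int) : Decidable (Pre_to_bins ns) := by unfold Pre_to_bins; infer_instance
def pvWitness_to_bins : List Int := [2, 0, 2]

def Spec_to_bins (ns : List Int) (out : List Int) : Prop := out = to_bins_alt ns
instance (ns : List Int) (out : List Int) : Decidable (Spec_to_bins ns out) := by unfold Spec_to_bins; infer_instance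

-- ===== CLAIM (what is proved, stated in full; the proofs are below) =====
def Claim_equal_to_bins : Prop := ∀ (ns : List Int), Dom_to_bins ns → Pre_to_bins ns → Spec_to_bins ns (to_bins ns)

-- ===== LEMMAS AND PROOFS =====

-- A's append loop is a map over the range.
theorem foldl_append_map (f : Int → Int) (l : List Int) (acc : List Int) :
    l.foldl (fun bs i => bs ++ [f i]) acc = acc ++ l.map f := by
  induction l generalizing acc with
  | nil => simp
  | cons x t ih => simp [List.foldl, ih]

-- B's scatter loop, characterised pointwise for an arbitrary accumulator.
theorem scatter_getElem? (ns : List Int) (acc : List Int) (j : ℕ) :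
    (ns.foldl (fun bs n => if 0 ≤ n then bs.set n.toNat 1 else bs) acc)[j]? =
      if (j : Int) ∈ ns ∧ j < acc.length then some 1 else acc[j]? := by
  induction ns generalizing acc with
  | nil => simp
  | cons n t ih =>
    simp only [List.foldl_cons, ih]
    by_cases hn : 0 ≤ n
    · simp only [if_pos hn, List.length_set]
      by_cases ht : (j : Int) ∈ t ∧ j < acc.length
      · rw [if_pos ht, if_pos ⟨List.mem_cons_of_mem _ ht.1, ht.2⟩]
      · rw [if_neg ht]
        by_cases hj : j < acc.length
        · have hjt : (j : Int) ∉ t := fun h => ht ⟨h, hj⟩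
          by_cases hnj : n = (j : Int)
          · have : n.toNat = j := by omega
            rw [if_pos ⟨by simp [hnj], hj⟩, this, List.getElem?_set_self (by omega)]
          · have hmem : (j : Int) ∉ n :: t := by
              simp only [List.mem_cons, not_or]
              exact ⟨fun h => hnj h.symm, hjt⟩
            rw [if_neg (by tauto), List.getElem?_set_ne (by omega)]
        · rw [if_neg (by tauto)]
          have h1 : acc[j]? = none := List.getElem?_eq_none (by omega)
          have h2 : (acc.set n.toNat 1)[j]? = none := List.getElem?_eq_none (by simpa using (by omega : acc.length ≤ j))
          rw [h1, h2]
    · simp only [if_neg hn]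
      have : (j : Int) ∈ n :: t ↔ (j : Int) ∈ t := by
        constructor
        · intro h; rcases List.mem_cons.mp h with h | h
          · omega
          · exact h
        · exact List.mem_cons_of_mem _
      by_cases ht : (j : Int) ∈ t ∧ j < acc.length
      · rw [if_pos ht, if_pos ⟨this.mpr ht.1, ht.2⟩]
      · rw [if_neg ht, if_neg (by rw [this] at *; tauto)]

-- ===== VERDICT (by name: the statement is the Claim_ definition above) =====
theorem to_bins_spec : Claim_equal_to_bins := by
  intro ns _ _
  unfold Spec_to_bins to_bins to_bins_alt
  cases h : PySem.List.max? ns (fun x => x) with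
  | none => rfl
  | some m =>
    simp only
    apply List.ext_getElem?
    intro j
    rw [foldl_append_map, scatter_getElem?, List.nil_append, PySem.List.pyRange_one]
    have hmax : ∀ y ∈ ns, y ≤ m := by
      intro y hy
      simpa using PySem.List.max?_isMax h y hy
    simp only [List.length_replicate]
    rw [List.map_map]
    by_cases hj : j < (m + 1 - 0).toNat
    · rw [List.getElem?_map, List.getElem?_range hj]
      simp only [Option.map_some, Function.comp, zero_add]
      by_cases hmem : (j : Int) ∈ ns
      · rw [if_pos hmem, if_pos ⟨hmem, by omega⟩]
      · rw [if_neg hmem, if_neg (fun hc => hmem hc.1), List.getElem?_replicate,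
          if_pos (by omega)]
    · have hj' : ¬ j < (m + 1).toNat := by omega
      rw [if_neg (fun hc => hj' hc.2), List.getElem?_replicate, if_neg hj']
      exact List.getElem?_eq_none (by simpa using (by omega : (m + 1 - 0).toNat ≤ j))
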